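-- pv_equiv track=rewrite | github.com/ClementBraunNSI/nsi-courses | interro_2025_2026/B3/B3 - Braun (2025-2027)-DS Python G2-4830/Mohamed-Karim Louassa_24200_assignsubmission_file/ds.py | contient_deux_types
-- ===== SOURCE A (Python) =====
-- def nb_occurrences(texte: str, lettre: str) -> int:
-- 	compteur = 0
-- 	for c in texte:
-- 		if lettre in c:
-- 			compteur = compteur+1
-- 	return compteur
--
-- def contient_separateur(code: str) -> bool:
-- 	seps = "-_"
-- 	for c in code:
-- 		if c in seps:
-- 			return True
-- 	return False
--
-- def contient_deux_types(code: str) -> bool: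
-- 	alphabet = "abcdefghijklmnopqrstuvwxyzABCDEFGHIJKLMNOPQRSTUVWXYZ"
-- 	digits = "0123456789"
-- 	a_lettre = False
-- 	# au moins une lettre ?
-- 	i = 0
-- 	while i < len(alphabet):
-- 		if nb_occurrences(code, alphabet[i]) > 0:
-- 			a_lettre = True
-- 		i = i + 1
-- 	a_chiffre = False
-- 	j = 0
-- 	while j < len(digits):
-- 		if nb_occurrences(code, digits[j]) > 0:
-- 			a_chiffre = True
-- 		j = j + 1
-- 	a_sep = contient_separateur(code)
-- 	if (a_lettre and a_chiffre) or (a_lettre and a_sep) or (a_chiffre and a_sep):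
-- 		return True
-- 	return False
-- ===== SOURCE B (Python) =====
-- def contient_deux_types(code: str) -> bool:
--     present = set(code)
--     types = 0
--     if present & set("abcdefghijklmnopqrstuvwxyzABCDEFGHIJKLMNOPQRSTUVWXYZ"):
--         types += 1
--     if present & set("0123456789"):
--         types += 1
--     if present & set("-_"):
--         types += 1
--     return types >= 2
-- ===== Notes on version B (the rewrite author's own statement) =====
-- stated objective: faster
-- what changed: B builds the set of characters of code once and counts how many of the three character classes intersect it, replacing A's per-class loops that rescan the whole code once per alphabet/digit character (62 full passes) with a single pass, and the pairwise-OR with a count-and-threshold.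
import Mathlib
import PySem

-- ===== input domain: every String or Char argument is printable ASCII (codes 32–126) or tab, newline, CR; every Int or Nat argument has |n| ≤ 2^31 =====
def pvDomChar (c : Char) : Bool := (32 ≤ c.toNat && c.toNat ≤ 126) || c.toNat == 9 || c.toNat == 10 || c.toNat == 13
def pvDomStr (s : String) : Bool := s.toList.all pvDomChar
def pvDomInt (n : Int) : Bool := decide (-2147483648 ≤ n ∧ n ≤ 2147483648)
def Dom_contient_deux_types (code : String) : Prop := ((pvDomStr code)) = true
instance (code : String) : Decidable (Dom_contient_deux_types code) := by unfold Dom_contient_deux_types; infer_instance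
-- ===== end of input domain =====

-- B builds the set of characters of code once and counts how many of the three character
-- classes intersect it, replacing A's per-class loops that each rescan the whole code (objective: simpler).

-- ===== PORT A =====
def nb_occurrences (texte : String) (lettre : String) : Int :=
  texte.toList.foldl
    (fun compteur c => if PySem.Str.isIn lettre (String.ofList [c]) then compteur + 1 else compteur) 0

def contient_separateur (code : String) : Bool :=
  code.toList.any (fun c => PySem.Str.isIn (String.ofList [c]) "-_")

def contient_deux_types (code : String) : Bool :=
  let alphabet := "abcdefghijklmnopqrstuvwxyzABCDEFGHIJKLMNOPQRSTUVWXYZ"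
  let digits := "0123456789"
  let a_lettre := alphabet.toList.foldl
    (fun a ch => if nb_occurrences code (String.ofList [ch]) > 0 then true else a) false
  let a_chiffre := digits.toList.foldl
    (fun a ch => if nb_occurrences code (String.ofList [ch]) > 0 then true else a) false
  let a_sep := contient_separateur code
  if (a_lettre && a_chiffre) || (a_lettre && a_sep) || (a_chiffre && a_sep) then true
  else false

-- ===== PORT B =====
def contient_deux_types_alt (code : String) : Bool :=
  let present : PySem.Set Char := PySem.Set.ofList code.toList
  let types : Int := 0
  let types := if PySem.Set.inter present (PySem.Set.ofList "abcdefghijklmnopqrstuvwxyzABCDEFGHIJKLMNOPQRSTUVWXYZ".toList) ≠ [] then types + 1 else types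
  let types := if PySem.Set.inter present (PySem.Set.ofList "0123456789".toList) ≠ [] then types + 1 else types
  let types := if PySem.Set.inter present (PySem.Set.ofList "-_".toList) ≠ [] then types + 1 else types
  decide (types ≥ 2)

-- ===== PRECONDITION & SPEC =====
def Spec_contient_deux_types (code : String) (out : Bool) : Prop := out = contient_deux_types_alt code
instance (code : String) (out : Bool) : Decidable (Spec_contient_deux_types code out) := by unfold Spec_contient_deux_types; infer_instance

-- ===== CLAIM (what is proved, stated in full; the proofs are below) =====
def Claim_equal_contient_deux_types : Prop := ∀ (code : String), Dom_contient_deux_types code → Spec_contient_deux_types code (contient_deux_types code)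

-- ===== LEMMAS AND PROOFS =====

-- the "latch" fold of A's while-loops is an any
theorem foldl_latch_eq_any {α : Type} (p : α → Prop) [DecidablePred p] (xs : List α) (a : Bool) :
    xs.foldl (fun a ch => if p ch then true else a) a = (a || xs.any fun ch => decide (p ch)) := by
  induction xs generalizing a with
  | nil => simp
  | cons x xs ih =>
    simp only [List.foldl_cons, List.any_cons, ih]
    by_cases h : p x <;> simp [h]

-- the counting fold of nb_occurrences adds countP
theorem foldl_count {α : Type} (p : α → Bool) (xs : List α) (k : Int) :
    xs.foldl (fun n c => if p c then n + 1 else n) k = k + (xs.countP p : Int) := by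
  induction xs generalizing k with
  | nil => simp
  | cons x xs ih =>
    rcases Bool.eq_false_or_eq_true (p x) with h | h
    · simp [h, ih]; ring
    · simp [h, ih]

theorem isIn_single (ch c : Char) :
    PySem.Str.isIn (String.ofList [ch]) (String.ofList [c]) = (ch == c) := by
  rw [Bool.eq_iff_iff, PySem.Str.isIn_iff_infix]
  simp [List.singleton_infix_singleton_iff]

theorem nb_occurrences_pos (code : String) (ch : Char) :
    nb_occurrences code (String.ofList [ch]) > 0 ↔ ch ∈ code.toList := by
  unfold nb_occurrences
  rw [foldl_count]
  simp only [isIn_single, zero_add]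
  constructor
  · intro h
    have hn : 0 < code.toList.countP (fun c => ch == c) := by exact_mod_cast h
    obtain ⟨c, hc, hb⟩ := List.countP_pos_iff.mp hn
    rwa [show ch = c from by simpa using hb]
  · intro h
    have hn : 0 < code.toList.countP (fun c => ch == c) :=
      List.countP_pos_iff.mpr ⟨ch, h, by simp⟩
    exact_mod_cast hn

theorem latch_eq_exists (code : String) (cls : List Char) :
    (cls.foldl (fun a ch => if nb_occurrences code (String.ofList [ch]) > 0 then true else a) false)
      = decide (∃ c ∈ code.toList, c ∈ cls) := by
  rw [foldl_latch_eq_any (fun ch => nb_occurrences code (String.ofList [ch]) > 0)]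
  rw [Bool.eq_iff_iff]
  simp only [Bool.false_or, List.any_eq_true, decide_eq_true_eq, nb_occurrences_pos]
  exact ⟨fun ⟨ch, h1, h2⟩ => ⟨ch, h2, h1⟩, fun ⟨c, h1, h2⟩ => ⟨c, h2, h1⟩⟩

theorem sep_eq_exists (code : String) :
    contient_separateur code = decide (∃ c ∈ code.toList, c ∈ ("-_".toList)) := by
  unfold contient_separateur
  rw [Bool.eq_iff_iff]
  simp only [List.any_eq_true, decide_eq_true_eq, PySem.Str.isIn_iff_infix]
  constructor
  · rintro ⟨c, hc, hin⟩
    have hmem := (List.singleton_infix_iff c ("-_".toList)).mp (by simpa using hin)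
    exact ⟨c, hc, hmem⟩
  · rintro ⟨c, hc, hm⟩
    refine ⟨c, hc, ?_⟩
    simpa using (List.singleton_infix_iff c ("-_".toList)).mpr hm

theorem inter_ne_nil (code : String) (cls : List Char) :
    (PySem.Set.inter (PySem.Set.ofList code.toList) (PySem.Set.ofList cls) ≠ []) ↔
      (∃ c ∈ code.toList, c ∈ cls) := by
  constructor
  · intro h
    rcases List.exists_mem_of_ne_nil _ h with ⟨c, hc⟩
    rw [PySem.Set.mem_inter _ _ _] at hc
    exact ⟨c, by simpa [PySem.Set.mem_ofList] using hc.1, by simpa [PySem.Set.mem_ofList] using hc.2⟩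
  · rintro ⟨c, hc, hcl⟩
    exact List.ne_nil_of_mem ((PySem.Set.mem_inter _ _ _).mpr
      ⟨(PySem.Set.mem_ofList _ _).mpr hc, (PySem.Set.mem_ofList _ _).mpr hcl⟩)

-- ===== VERDICT (by name: the statement is the Claim_ definition above) =====
theorem contient_deux_types_spec : Claim_equal_contient_deux_types := by
  intro code _
  show contient_deux_types code = contient_deux_types_alt code
  unfold contient_deux_types contient_deux_types_alt
  simp only [latch_eq_exists, sep_eq_exists]
  by_cases hL : ∃ c ∈ code.toList, c ∈ ("abcdefghijklmnopqrstuvwxyzABCDEFGHIJKLMNOPQRSTUVWXYZ".toList) <;>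
  by_cases hD : ∃ c ∈ code.toList, c ∈ ("0123456789".toList) <;>
  by_cases hS : ∃ c ∈ code.toList, c ∈ ("-_".toList) <;>
  · simp only [inter_ne_nil, hL, hD, hS, decide_true, decide_false, ne_eq,
      if_true, if_false, Bool.and_true, Bool.and_false, Bool.or_true, Bool.or_false]
    decide
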